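-- pv_equiv track=rewrite | github.com/GoogleCloudPlatform/dfcx-scrapi | src/dfcx_scrapi/agent_extract/common.py | clean_display_name
-- ===== SOURCE A (Python) =====
-- def clean_display_name(display_name: str):
--     """Replace cspecial haracters from map for the given display name."""
--     patterns = {
--         "%22": '"',
--         "%23": "#",
--         "%24": "$",
--         "%26": "&",
--         "%27": "'",
--         "%28": "(",
--         "%29": ")",
--         "%2b": "+",
--         "%2c": ",",
--         "%2f": "/",
--         "%3a": ":",
--         "%3c": "<",
--         "%3d": "=",
--         "%3e": ">",
--         "%3f": "?",
--         "%5b": "[",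
--         "%5d": "]",
--         "%e2%80%9c": "“",
--         "%e2%80%9d": "”",
--     }
--
--     for key, value in patterns.items():
--         if key in display_name:
--             display_name = display_name.replace(key, value)
--
--     return display_name
-- ===== SOURCE B (Python) =====
-- import re
--
-- _PATTERNS = {
--     "%22": '"',
--     "%23": "#",
--     "%24": "$",
--     "%26": "&",
--     "%27": "'",
--     "%28": "(",
--     "%29": ")",
--     "%2b": "+",
--     "%2c": ",",
--     "%2f": "/",
--     "%3a": ":",
--     "%3c": "<",
--     "%3d": "=",
--     "%3e": ">",
--     "%3f": "?",
--     "%5b": "[",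
--     "%5d": "]",
--     "%e2%80%9c": "\u201c",
--     "%e2%80%9d": "\u201d",
-- }
--
-- _RX = re.compile("|".join(re.escape(key) for key in _PATTERNS))
--
--
-- def clean_display_name(display_name: str):
--     """Replace special characters from map for the given display name."""
--     return _RX.sub(lambda m: _PATTERNS[m.group(0)], display_name)
-- ===== Notes on version B (the rewrite author's own statement) =====
-- stated objective: idiomatic
-- what changed: Replaces A's nineteen sequential full-string str.replace passes with one precompiled alternation regex applied in a single left-to-right pass (re.sub with a dict lookup on the matched key); equal because the keys never overlap one another and the replacement values contain no key characters.
import Mathlib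
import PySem

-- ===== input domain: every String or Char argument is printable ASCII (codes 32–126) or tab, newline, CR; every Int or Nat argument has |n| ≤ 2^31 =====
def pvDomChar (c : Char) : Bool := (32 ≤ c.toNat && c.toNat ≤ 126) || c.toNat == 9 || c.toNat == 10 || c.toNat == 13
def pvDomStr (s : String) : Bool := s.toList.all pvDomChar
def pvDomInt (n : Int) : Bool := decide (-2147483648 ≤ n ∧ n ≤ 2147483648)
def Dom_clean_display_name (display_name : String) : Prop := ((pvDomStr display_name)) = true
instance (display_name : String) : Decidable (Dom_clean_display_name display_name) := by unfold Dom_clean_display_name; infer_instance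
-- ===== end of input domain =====

-- B replaces A's nineteen sequential str.replace passes by one single left-to-right
-- pass with an alternation regex over the same pattern table (idiomatic re.sub).

-- ===== PORT A =====
-- the dict literal, as an association list in insertion order
def pvPatternsA : List (String × String) :=
  [("%22", "\""), ("%23", "#"), ("%24", "$"), ("%26", "&"), ("%27", "'"),
   ("%28", "("), ("%29", ")"), ("%2b", "+"), ("%2c", ","), ("%2f", "/"),
   ("%3a", ":"), ("%3c", "<"), ("%3d", "="), ("%3e", ">"), ("%3f", "?"),
   ("%5b", "["), ("%5d", "]"), ("%e2%80%9c", "“"), ("%e2%80%9d", "”")]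

def clean_display_name (display_name : String) : String :=
  pvPatternsA.foldl
    (fun s p => if PySem.Str.isIn p.1 s then PySem.Str.replace s p.1 p.2 else s)
    display_name

-- ===== PORT B =====
-- the same table, over the character stream the compiled regex scans
def pvPatternsB : List (List Char × List Char) :=
  [("%22".toList, "\"".toList), ("%23".toList, "#".toList), ("%24".toList, "$".toList),
   ("%26".toList, "&".toList), ("%27".toList, "'".toList), ("%28".toList, "(".toList),
   ("%29".toList, ")".toList), ("%2b".toList, "+".toList), ("%2c".toList, ",".toList),
   ("%2f".toList, "/".toList), ("%3a".toList, ":".toList), ("%3c".toList, "<".toList),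
   ("%3d".toList, "=".toList), ("%3e".toList, ">".toList), ("%3f".toList, "?".toList),
   ("%5b".toList, "[".toList), ("%5d".toList, "]".toList),
   ("%e2%80%9c".toList, "“".toList), ("%e2%80%9d".toList, "”".toList)]

-- rx.sub: one left-to-right pass; at each position the first alternative that
-- matches is replaced and the scan resumes after the match
def pvScanB : List Char → List Char
  | [] => []
  | c :: t =>
    match h : pvPatternsB.find? (fun p => p.1.isPrefixOf (c :: t)) with
    | some pv => pv.2 ++ pvScanB ((c :: t).drop pv.1.length)
    | none => c :: pvScanB t
termination_by l => l.length
decreasing_by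
  · have hm := List.mem_of_find?_eq_some h
    have hlen : ∀ p ∈ pvPatternsB, 0 < p.1.length := by decide
    have := hlen _ hm
    simp only [List.length_drop, List.length_cons]
    omega
  · simp

def clean_display_name_alt (display_name : String) : String :=
  String.ofList (pvScanB display_name.toList)

-- ===== PRECONDITION & SPEC =====
def Spec_clean_display_name (display_name : String) (out : String) : Prop := out = clean_display_name_alt display_name
instance (display_name : String) (out : String) : Decidable (Spec_clean_display_name display_name out) := by unfold Spec_clean_display_name; infer_instance

-- ===== CLAIM (what is proved, stated in full; the proofs are below) =====
def Claim_equal_clean_display_name : Prop := ∀ (display_name : String), Dom_clean_display_name display_name → Spec_clean_display_name display_name (clean_display_name display_name)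

-- ===== LEMMAS AND PROOFS =====

-- characters that occur in the escape keys; no replacement value contains one
def pvKC (c : Char) : Bool :=
  ['%', '0', '2', '3', '4', '5', '6', '7', '8', '9', 'a', 'b', 'c', 'd', 'e', 'f'].contains c

-- "k can match nowhere inside u, whatever follows u": at every start offset j the
-- mismatch happens already inside u
abbrev pvSafe (k u : List Char) : Prop :=
  ∀ j < u.length, ∃ m < k.length, j + m < u.length ∧ k[m]? ≠ u[j + m]?

-- clean fuel-free model of CPython's str.replace for a nonempty pattern
def pvRepl (k v : List Char) : List Char → List Char
  | [] => []
  | c :: t =>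
    if h : k.isPrefixOf (c :: t) ∧ k ≠ [] then v ++ pvRepl k v ((c :: t).drop k.length)
    else c :: pvRepl k v t
termination_by l => l.length
decreasing_by
  · have : 0 < k.length := List.length_pos_iff.mpr h.2
    simp only [List.length_drop, List.length_cons]
    omega
  · simp

lemma pvGo_spec (old new : List Char) (hold : old ≠ []) :
    ∀ fuel l acc, l.length ≤ fuel →
      PySem.Chars.replace.go old new fuel l acc = acc.reverse ++ pvRepl old new l := by
  intro fuel
  induction fuel with
  | zero =>
      intro l acc hl
      have : l = [] := List.length_eq_zero_iff.mp (Nat.le_zero.mp hl)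
      subst this
      simp [PySem.Chars.replace.go, pvRepl]
  | succ n ih =>
      intro l acc hl
      cases l with
      | nil => simp [PySem.Chars.replace.go, pvRepl]
      | cons c t =>
          by_cases hp : old.isPrefixOf (c :: t)
          · have hdrop : ((c :: t).drop old.length).length ≤ n := by
              have : 0 < old.length := List.length_pos_iff.mpr hold
              simp only [List.length_drop, List.length_cons]
              simp only [List.length_cons] at hl
              omega
            rw [show PySem.Chars.replace.go old new (n+1) (c :: t) acc =
                  PySem.Chars.replace.go old new n ((c :: t).drop old.length) (new.reverse ++ acc) from by
              simp [PySem.Chars.replace.go, hp]]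
            rw [ih _ _ hdrop]
            rw [show pvRepl old new (c :: t) = new ++ pvRepl old new ((c :: t).drop old.length) from by
              rw [pvRepl]; rw [dif_pos ⟨hp, hold⟩]]
            simp
          · have ht : t.length ≤ n := by simp only [List.length_cons] at hl; omega
            rw [show PySem.Chars.replace.go old new (n+1) (c :: t) acc =
                  PySem.Chars.replace.go old new n t (c :: acc) from by
              simp [PySem.Chars.replace.go, hp]]
            rw [ih _ _ ht]
            rw [show pvRepl old new (c :: t) = c :: pvRepl old new t from by
              rw [pvRepl]; rw [dif_neg (by tauto)]]
            simp

lemma pvReplace_eq (k v l : List Char) (hk : k ≠ []) :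
    PySem.Chars.replace l k v = pvRepl k v l := by
  unfold PySem.Chars.replace
  rw [if_neg (by simp [List.isEmpty_iff, hk])]
  simpa using pvGo_spec k v hk l.length l [] le_rfl

lemma pvRepl_id (k v : List Char) : ∀ l, ¬ k <:+: l → pvRepl k v l = l := by
  intro l
  induction l with
  | nil => intro _; simp [pvRepl]
  | cons c t ih =>
      intro h
      rw [pvRepl, dif_neg]
      · rw [ih (fun hi => h (hi.trans (List.suffix_cons c t).isInfix))]
      · rintro ⟨hp, -⟩
        exact h (List.isPrefixOf_iff_prefix.mp hp).isInfix

lemma pvSafe_not_prefix {k u : List Char} (hs : pvSafe k u) (hu : u ≠ []) (z : List Char) :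
    ¬ k <+: (u ++ z) := by
  intro hp
  obtain ⟨m, hm, hmu, hne⟩ := hs 0 (List.length_pos_iff.mpr hu)
  simp only [Nat.zero_add] at hmu hne
  apply hne
  obtain ⟨w, hw⟩ := hp
  rw [show u[m]? = (u ++ z)[m]? from (List.getElem?_append_left hmu).symm, ← hw,
    List.getElem?_append_left hm]

lemma pvSafe_tail {k : List Char} {a : Char} {u : List Char} (hs : pvSafe k (a :: u)) :
    pvSafe k u := by
  intro j hj
  obtain ⟨m, hm, hmu, hne⟩ := hs (j + 1) (by simp; omega)
  refine ⟨m, hm, ?_, ?_⟩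
  · simp only [List.length_cons] at hmu; omega
  · simpa [Nat.add_right_comm j 1 m] using hne

lemma pvRepl_block (k v : List Char) :
    ∀ u, pvSafe k u → ∀ z, pvRepl k v (u ++ z) = u ++ pvRepl k v z := by
  intro u
  induction u with
  | nil => intro _ z; simp
  | cons a u' ih =>
      intro hs z
      rw [List.cons_append, pvRepl, dif_neg]
      · rw [ih (pvSafe_tail hs) z]; simp
      · rintro ⟨hp, -⟩
        exact pvSafe_not_prefix hs (by simp) z
          (by simpa using List.isPrefixOf_iff_prefix.mp hp)

lemma pvRepl_consume (k v z : List Char) (hk : k ≠ []) :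
    pvRepl k v (k ++ z) = v ++ pvRepl k v z := by
  cases k with
  | nil => exact absurd rfl hk
  | cons c k' =>
      rw [List.cons_append, pvRepl, dif_pos]
      · rw [List.length_cons, List.drop_succ_cons, List.drop_left]
      · exact ⟨by rw [← List.cons_append]; exact List.isPrefixOf_iff_prefix.mpr (List.prefix_append _ _), hk⟩

lemma pvNocreate (k v : List Char) (hv : v ≠ []) (hvc : ∀ c ∈ v, pvKC c = false) :
    ∀ n l w, l.length ≤ n → (∀ c ∈ w, pvKC c = true) → w <+: pvRepl k v l → w <+: l := by
  intro n
  induction n with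
  | zero =>
      intro l w hl _ hw
      have : l = [] := List.length_eq_zero_iff.mp (Nat.le_zero.mp hl)
      subst this
      simpa [pvRepl] using hw
  | succ n ih =>
      intro l w hl hwc hw
      cases l with
      | nil => simpa [pvRepl] using hw
      | cons c t =>
          by_cases h : k.isPrefixOf (c :: t) ∧ k ≠ []
          · rw [pvRepl, dif_pos h] at hw
            cases w with
            | nil => exact List.nil_prefix
            | cons w0 w' =>
                cases v with
                | nil => exact absurd rfl hv
                | cons v0 v' =>
                    have hwv : w0 = v0 := by
                      rw [List.cons_append] at hw
                      exact (List.cons_prefix_cons.mp hw).1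
                    have h1 : pvKC w0 = true := hwc w0 (by simp)
                    have h2 : pvKC v0 = false := hvc v0 (by simp)
                    rw [hwv, h2] at h1
                    exact absurd h1 (by simp)
          · rw [pvRepl, dif_neg h] at hw
            cases w with
            | nil => exact List.nil_prefix
            | cons w0 w' =>
                obtain ⟨rfl, hw'⟩ := List.cons_prefix_cons.mp hw
                have ht : t.length ≤ n := by simp only [List.length_cons] at hl; omega
                exact List.cons_prefix_cons.mpr
                  ⟨rfl, ih t w' ht (fun x hx => hwc x (by simp [hx])) hw'⟩

-- the sequential composite, over char lists
def pvFold (ps : List (List Char × List Char)) (l : List Char) : List Char :=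
  ps.foldl (fun s p => pvRepl p.1 p.2 s) l

lemma pvFold_nil (ps : List (List Char × List Char)) : pvFold ps [] = [] := by
  induction ps with
  | nil => rfl
  | cons p ps ih => simp only [pvFold, List.foldl_cons] at *; simpa [pvRepl] using ih

lemma pvFold_block (ps : List (List Char × List Char)) (u : List Char)
    (h : ∀ p ∈ ps, pvSafe p.1 u) :
    ∀ z, pvFold ps (u ++ z) = u ++ pvFold ps z := by
  induction ps generalizing u with
  | nil => intro z; simp [pvFold]
  | cons p ps ih =>
      intro z
      simp only [pvFold, List.foldl_cons]
      rw [pvRepl_block p.1 p.2 u (h p (by simp)) z]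
      exact ih u (fun q hq => h q (by simp [hq])) (pvRepl p.1 p.2 z)

-- goodness of the table rows
abbrev pvGood (p : List Char × List Char) : Prop :=
  p.1 ≠ [] ∧ (∀ c ∈ p.1, pvKC c = true) ∧ p.2 ≠ [] ∧ (∀ c ∈ p.2, pvKC c = false)

lemma pvFold_cons (ps : List (List Char × List Char)) (hg : ∀ p ∈ ps, pvGood p) (c : Char) :
    ∀ t, (∀ p ∈ ps, ¬ p.1 <+: (c :: t)) → pvFold ps (c :: t) = c :: pvFold ps t := by
  induction ps with
  | nil => intro t _; rfl
  | cons p ps ih =>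
      intro t h
      have hstep : pvRepl p.1 p.2 (c :: t) = c :: pvRepl p.1 p.2 t := by
        rw [pvRepl, dif_neg]
        rintro ⟨hp, -⟩
        exact h p (by simp) (List.isPrefixOf_iff_prefix.mp hp)
      simp only [pvFold, List.foldl_cons]
      rw [hstep]
      refine ih (fun q hq => hg q (by simp [hq])) (pvRepl p.1 p.2 t) (fun q hq hpre => ?_)
      have hgp := hg p (by simp)
      have hgq := hg q (by simp [hq])
      have : (c :: pvRepl p.1 p.2 t) = pvRepl p.1 p.2 (c :: t) := hstep.symm
      rw [this] at hpre
      exact h q (by simp [hq]) (pvNocreate p.1 p.2 hgp.2.2.1 hgp.2.2.2 (c :: t).length _ q.1 le_rfl hgq.2.1 hpre)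

lemma pvSafe_of_val (k u : List Char) (hk : ∀ c ∈ k, pvKC c = true) (hk0 : k ≠ [])
    (hu : ∀ c ∈ u, pvKC c = false) : pvSafe k u := by
  intro j hj
  refine ⟨0, List.length_pos_iff.mpr hk0, by omega, ?_⟩
  cases k with
  | nil => exact absurd rfl hk0
  | cons k0 k' =>
      have h1 : pvKC k0 = true := hk k0 (by simp)
      have h2 : pvKC u[j] = false := hu _ (List.getElem_mem _)
      intro hc
      rw [show j + 0 = j from rfl, List.getElem?_eq_getElem hj] at hc
      have hk0j : k0 = u[j] := by simpa using hc
      rw [← hk0j] at h2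
      rw [h1] at h2
      exact absurd h2 (by simp)

-- the table facts, checked by computation
-- Bool form of pvGood, for one bulk kernel evaluation over the table
def pvGoodB (p : List Char × List Char) : Bool :=
  (!p.1.isEmpty) && p.1.all pvKC && (!p.2.isEmpty) && p.2.all (fun c => !pvKC c)

set_option maxRecDepth 10000 in
lemma pvGoodAllB : pvPatternsB.all pvGoodB = true := by decide

lemma pvGoodAll : ∀ p ∈ pvPatternsB, pvGood p := by
  intro p hp
  have h := List.all_eq_true.mp pvGoodAllB p hp
  simp only [pvGoodB, Bool.and_eq_true] at h
  obtain ⟨⟨⟨h1, h2⟩, h3⟩, h4⟩ := h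
  refine ⟨by simpa [List.isEmpty_iff] using h1, ?_, by simpa [List.isEmpty_iff] using h3, ?_⟩
  · exact fun c hc => List.all_eq_true.mp h2 c hc
  · exact fun c hc => by simpa using List.all_eq_true.mp h4 c hc
-- Bool form of pvSafe, for one bulk kernel evaluation over the table
def pvSafeB (k u : List Char) : Bool :=
  (List.range u.length).all fun j =>
    (List.range k.length).any fun m => decide (j + m < u.length) && (k[m]? != u[j + m]?)

lemma pvSafeB_spec {k u : List Char} (h : pvSafeB k u = true) : pvSafe k u := by
  intro j hj
  simp only [pvSafeB, List.all_eq_true, List.mem_range] at h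
  obtain ⟨m, hmr, hand⟩ := List.any_eq_true.mp (h j hj)
  simp only [List.mem_range] at hmr
  rw [Bool.and_eq_true] at hand
  obtain ⟨h1, h2⟩ := hand
  exact ⟨m, hmr, of_decide_eq_true h1, by simpa using h2⟩

set_option maxRecDepth 10000 in
lemma pvSafeAllB :
    pvPatternsB.all (fun p => pvPatternsB.all (fun q => (p.1 == q.1) || pvSafeB p.1 q.1)) = true := by
  decide

lemma pvSafeAll : ∀ p ∈ pvPatternsB, ∀ q ∈ pvPatternsB, p.1 ≠ q.1 → pvSafe p.1 q.1 := by
  intro p hp q hq hne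
  apply pvSafeB_spec
  have hb := pvSafeAllB
  simp only [List.all_eq_true] at hb
  have hor := hb p hp q hq
  rw [Bool.or_eq_true] at hor
  rcases hor with h | h
  · exact absurd (by simpa using h) hne
  · exact h
set_option maxRecDepth 10000 in
lemma pvKeysNodup : (pvPatternsB.map Prod.fst).Nodup := by decide

lemma pvMain : ∀ n l, l.length ≤ n → pvFold pvPatternsB l = pvScanB l := by
  intro n
  induction n with
  | zero =>
      intro l hl
      have : l = [] := List.length_eq_zero_iff.mp (Nat.le_zero.mp hl)
      subst this
      rw [pvFold_nil, pvScanB]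
  | succ n ih =>
      intro l hl
      cases l with
      | nil => rw [pvFold_nil, pvScanB]
      | cons c t =>
          rcases hfind : pvPatternsB.find? (fun p => p.1.isPrefixOf (c :: t)) with _ | ⟨k, v⟩
          · -- no key matches at this position
            have hnone : ∀ p ∈ pvPatternsB, ¬ p.1 <+: (c :: t) := by
              intro p hp hpre
              have := List.find?_eq_none.mp hfind p hp
              exact this (List.isPrefixOf_iff_prefix.mpr hpre)
            rw [pvScanB, hfind]
            rw [pvFold_cons pvPatternsB pvGoodAll c t hnone]
            rw [ih t (by simp only [List.length_cons] at hl; omega)]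
          · -- the first matching key consumes
            have hmem : (k, v) ∈ pvPatternsB := List.mem_of_find?_eq_some hfind
            have hpre : k <+: (c :: t) :=
              List.isPrefixOf_iff_prefix.mp (by simpa using List.find?_some hfind)
            obtain ⟨y, hy⟩ := hpre
            have hknil : k ≠ [] := (pvGoodAll _ hmem).1
            have hdrop : (c :: t).drop k.length = y := by
              rw [← hy, List.drop_left]
            have hfoldky : pvFold pvPatternsB (k ++ y) = v ++ pvFold pvPatternsB y := by
              obtain ⟨pre, post, hsplit⟩ := List.append_of_mem hmem
              have hnd : ((pre ++ (k, v) :: post).map Prod.fst).Nodup := by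
                rw [← hsplit]; exact pvKeysNodup
              simp only [List.map_append, List.map_cons, List.nodup_append, List.nodup_cons] at hnd
              have hpreKeys : ∀ q ∈ pre, q.1 ≠ k := by
                intro q hq
                have := hnd.2.2 q.1 (List.mem_map_of_mem hq) k (by simp)
                simpa using this
              have hsafePre : ∀ q ∈ pre, pvSafe q.1 k := by
                intro q hq
                exact pvSafeAll q (by rw [hsplit]; simp [hq]) (k, v) hmem (hpreKeys q hq)
              have hsafePost : ∀ q ∈ post, pvSafe q.1 v := by
                intro q hq
                have hgq := pvGoodAll q (by rw [hsplit]; simp [hq])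
                have hgkv := pvGoodAll (k, v) hmem
                exact pvSafe_of_val q.1 v hgq.2.1 hgq.1 hgkv.2.2.2
              rw [hsplit]
              simp only [pvFold, List.foldl_append, List.foldl_cons]
              have h1 : ∀ z, pvFold pre (k ++ z) = k ++ pvFold pre z := pvFold_block pre k hsafePre
              simp only [pvFold] at h1
              rw [h1 y]
              rw [pvRepl_consume k v _ hknil]
              have h3 : ∀ z, pvFold post (v ++ z) = v ++ pvFold post z := pvFold_block post v hsafePost
              simp only [pvFold] at h3
              rw [h3]
            rw [pvScanB, hfind]
            simp only
            rw [hdrop, ← hy, hfoldky]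
            congr 1
            refine ih y ?_
            have : 0 < k.length := List.length_pos_iff.mpr hknil
            have := congrArg List.length hy
            simp only [List.length_append, List.length_cons] at this
            simp only [List.length_cons] at hl
            omega

lemma pvPatterns_map : pvPatternsA.map (fun p => (p.1.toList, p.2.toList)) = pvPatternsB := by
  decide

lemma pvStepA_eq (k v s : String) (hk : k.toList ≠ []) :
    (if PySem.Str.isIn k s then PySem.Str.replace s k v else s).toList
      = pvRepl k.toList v.toList s.toList := by
  by_cases h : PySem.Str.isIn k s
  · rw [if_pos h]
    show (PySem.Str.replace s k v).toList = _
    rw [PySem.Str.toList_replace]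
    exact pvReplace_eq _ _ _ hk
  · rw [if_neg h]
    refine (pvRepl_id k.toList v.toList s.toList ?_).symm
    intro hi
    apply h
    rw [PySem.Str.isIn_eq]
    exact (PySem.Chars.isIn_iff_infix _ _).mpr hi

lemma pvPortA_eq : ∀ (ps : List (String × String)) (s : String),
    (∀ p ∈ ps, p.1.toList ≠ []) →
    (ps.foldl (fun s p => if PySem.Str.isIn p.1 s then PySem.Str.replace s p.1 p.2 else s) s).toList
      = pvFold (ps.map (fun p => (p.1.toList, p.2.toList))) s.toList := by
  intro ps
  induction ps with
  | nil => intro s _; rfl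
  | cons p ps ih =>
      intro s h
      simp only [List.foldl_cons, List.map_cons, pvFold]
      have := pvStepA_eq p.1 p.2 s (h p (by simp))
      rw [show (pvRepl p.1.toList p.2.toList s.toList) = (if PySem.Str.isIn p.1 s then PySem.Str.replace s p.1 p.2 else s).toList from this.symm]
      exact ih _ (fun q hq => h q (by simp [hq]))

-- ===== VERDICT (by name: the statement is the Claim_ definition above) =====
theorem clean_display_name_spec : Claim_equal_clean_display_name := by
  intro s _
  unfold Spec_clean_display_name clean_display_name clean_display_name_alt
  have hne : ∀ p ∈ pvPatternsA, p.1.toList ≠ [] := by decide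
  have h1 := pvPortA_eq pvPatternsA s hne
  rw [pvPatterns_map] at h1
  rw [pvMain s.toList.length s.toList le_rfl] at h1
  rw [← h1]
  exact String.ofList_toList.symm
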